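-- pv_equiv track=rewrite | github.com/bozeklab/histo-miner | src/histo_miner/utils/misc.py | convert_names_to_orderedint
-- ===== SOURCE A (Python) =====
-- def convert_names_to_orderedint(name_list: list):
--     """
--     Convert a list of names into integers,
--     ensuring identical names have the same integer representation.
--
--     Parameters:
--     -----------
--     name_list: list
--         A list of names to be converted.
--
--     Returns:
--     -----------
--     results: list
--         A list of ordered integers from 1 to N
--         representing the names in the same order as the input list.
--     """
--     mapping = {}
--     current_integer = 1
--     patientids_ordered = []
--
--     for num in name_list:
--         if num not in mapping:
--             mapping[num] = current_integer
--             current_integer += 1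
--         patientids_ordered.append(mapping[num])
--
--     return patientids_ordered
-- ===== SOURCE B (Python) =====
-- def convert_names_to_orderedint(name_list: list):
--     # Each name's ordinal = how many distinct names appear up to (and including)
--     # its first occurrence; no mapping dict is maintained at all.
--     return [len(set(name_list[:name_list.index(name) + 1])) for name in name_list]
-- ===== Notes on version B (the rewrite author's own statement) =====
-- stated objective: alternative
-- what changed: Drops A's mapping dict and running counter entirely: B computes each ordinal directly as the number of distinct names in the prefix ending at that name's first occurrence (list.index + set cardinality per element), trading A's single O(n) stateful pass for a stateless quadratic comprehension.
import Mathlib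
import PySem

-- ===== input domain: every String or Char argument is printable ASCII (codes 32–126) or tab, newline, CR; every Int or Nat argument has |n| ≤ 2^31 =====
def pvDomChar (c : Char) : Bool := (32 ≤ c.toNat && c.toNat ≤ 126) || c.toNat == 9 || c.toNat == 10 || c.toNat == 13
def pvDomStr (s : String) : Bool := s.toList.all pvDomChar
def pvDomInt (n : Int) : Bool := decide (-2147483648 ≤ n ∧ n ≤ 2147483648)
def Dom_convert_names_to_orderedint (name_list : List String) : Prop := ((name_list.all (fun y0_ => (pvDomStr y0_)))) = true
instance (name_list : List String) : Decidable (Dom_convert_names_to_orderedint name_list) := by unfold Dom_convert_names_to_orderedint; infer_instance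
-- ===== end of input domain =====

-- B drops A's mapping dict and running counter entirely: each ordinal is computed stateless as
-- the number of distinct names in the prefix ending at that name's first occurrence (alternative).

-- ===== PORT A =====
-- literal transliteration of A's loop: state = (mapping, current_integer, patientids_ordered)
def convert_names_to_orderedint (name_list : List String) : List Int :=
  (name_list.foldl
    (fun (st : PySem.Dict String Int × Int × List Int) num =>
      let mapping := st.1
      let current_integer := st.2.1
      let out := st.2.2
      if mapping.contains num then
        (mapping, current_integer, out ++ [mapping.getD num 0])
      else
        let mapping' := mapping.insert num current_integer
        (mapping', current_integer + 1, out ++ [mapping'.getD num 0]))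
    ((PySem.Dict.empty : PySem.Dict String Int), (1 : Int), ([] : List Int))).2.2

-- ===== PORT B =====
-- [len(set(name_list[:name_list.index(name) + 1])) for name in name_list]
-- (name is drawn from name_list, so name_list.index(name) never raises: index? is some;
--  .getD 0 only extracts that value)
def convert_names_to_orderedint_alt (name_list : List String) : List Int :=
  name_list.map (fun name =>
    PySem.Set.len (PySem.Set.ofList (PySem.List.slice name_list none
      (some ((((PySem.List.index? name_list name).getD 0 : Nat) : Int) + 1)))))

-- ===== PRECONDITION & SPEC =====
def Spec_convert_names_to_orderedint (name_list : List String) (out : List Int) : Prop := out = convert_names_to_orderedint_alt name_list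
instance (name_list : List String) (out : List Int) : Decidable (Spec_convert_names_to_orderedint name_list out) := by unfold Spec_convert_names_to_orderedint; infer_instance

-- ===== CLAIM (what is proved, stated in full; the proofs are below) =====
def Claim_equal_convert_names_to_orderedint : Prop := ∀ (name_list : List String), Dom_convert_names_to_orderedint name_list → Spec_convert_names_to_orderedint name_list (convert_names_to_orderedint name_list)

-- ===== LEMMAS AND PROOFS =====

-- the ordinal of a name in a seen-list (1-based position of its first occurrence)
def pvRank (s : List String) (n : String) : Int :=
  ((PySem.List.index? s n).getD 0 : Nat) + 1

-- proof-only model of A's dict after having seen the names of `seen` (in order, no dups)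
def pvMapOf (unique : List String) : PySem.Dict String Int :=
  (PySem.List.enumerate unique 0).foldl (fun d p => d.insert p.2 (p.1 + 1)) PySem.Dict.empty

lemma pvMapOf_items (s : List String) (hnd : s.Nodup) :
    (pvMapOf s).items = (PySem.List.enumerate s 0).map (fun p => (p.2, p.1 + 1)) := by
  unfold pvMapOf
  have h := PySem.Dict.items_foldl_insert_fresh (l := PySem.List.enumerate s 0)
    (k := fun p => p.2) (v := fun p => p.1 + 1) (d := PySem.Dict.empty)
    (by intro a _; simp [PySem.Dict.contains_empty])
    (by rw [PySem.List.map_snd_enumerate]; exact hnd)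
  simpa using h

lemma pvMapOf_keys (s : List String) (hnd : s.Nodup) : (pvMapOf s).keys = s := by
  show (pvMapOf s).items.map (·.1) = s
  rw [pvMapOf_items s hnd, List.map_map]
  exact PySem.List.map_snd_enumerate s 0

lemma pvMapOf_contains (s : List String) (hnd : s.Nodup) (n : String) :
    (pvMapOf s).contains n = decide (n ∈ s) := by
  rw [PySem.Dict.contains_eq_decide_mem_keys, pvMapOf_keys s hnd]

lemma pvMapOf_getD (s : List String) (hnd : s.Nodup) (n : String) (h : n ∈ s) :
    (pvMapOf s).getD n 0 = pvRank s n := by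
  obtain ⟨j, hj⟩ : ∃ j, PySem.List.index? s n = some j :=
    Option.isSome_iff_exists.1 ((PySem.List.index?_isSome_iff s n).2 h)
  obtain ⟨hlt, hget, _⟩ := PySem.List.getElem_of_index?_eq_some hj
  have hmem : ((j : Int), n) ∈ PySem.List.enumerate s 0 := by
    rw [PySem.List.mem_enumerate_iff]
    exact ⟨j, hlt, by simp [hget]⟩
  have hitem : (n, (j : Int) + 1) ∈ (pvMapOf s).items := by
    rw [pvMapOf_items s hnd]
    exact List.mem_map.2 ⟨((j : Int), n), hmem, rfl⟩
  have hk : (pvMapOf s).keys.Nodup := by rw [pvMapOf_keys s hnd]; exact hnd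
  rw [PySem.Dict.getD_of_mem_items (pvMapOf s) hitem hk 0]
  unfold pvRank
  rw [hj]
  simp

lemma pvMapOf_append (s : List String) (n : String) :
    pvMapOf (s ++ [n]) = (pvMapOf s).insert n ((s.length : Int) + 1) := by
  unfold pvMapOf
  rw [PySem.List.enumerate_append, List.foldl_append]
  simp [PySem.List.enumerate_cons, PySem.List.enumerate_nil]

lemma pvRank_append_of_mem (s t : List String) (n : String) (h : n ∈ s) :
    pvRank (s ++ t) n = pvRank s n := by
  unfold pvRank
  rw [PySem.List.index?_append_of_mem t h]

lemma pvRank_update_of_mem (s t : List String) (n : String) (h : n ∈ s) :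
    pvRank (PySem.Set.update s t) n = pvRank s n := by
  rw [PySem.Set.update_eq_append_filter]
  exact pvRank_append_of_mem _ _ _ h

-- A's loop invariant: from state (pvMapOf seen, |seen|+1, out) the loop appends the
-- first-occurrence ranks taken in the final seen-list
lemma pvLoopA (l : List String) (seen : List String) (hnd : seen.Nodup) (out : List Int) :
    l.foldl
      (fun (st : PySem.Dict String Int × Int × List Int) num =>
        let mapping := st.1
        let current_integer := st.2.1
        let o := st.2.2
        if mapping.contains num then
          (mapping, current_integer, o ++ [mapping.getD num 0])
        else
          let mapping' := mapping.insert num current_integer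
          (mapping', current_integer + 1, o ++ [mapping'.getD num 0]))
      (pvMapOf seen, (seen.length : Int) + 1, out)
    = (pvMapOf (PySem.Set.update seen l), ((PySem.Set.update seen l).length : Int) + 1,
       out ++ l.map (fun n => pvRank (PySem.Set.update seen l) n)) := by
  induction l generalizing seen out with
  | nil => simp [PySem.Set.update_nil]
  | cons n t ih =>
    rw [List.foldl_cons, PySem.Set.update_cons]
    by_cases hmem : n ∈ seen
    · have hc : (pvMapOf seen).contains n = true := by
        rw [pvMapOf_contains seen hnd]; simpa using hmem
      have hadd : PySem.Set.add seen n = seen := PySem.Set.add_of_mem hmem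
      simp only [hc, if_pos]
      rw [hadd] at *
      rw [ih seen hnd (out ++ [(pvMapOf seen).getD n 0])]
      rw [pvMapOf_getD seen hnd n hmem]
      have : pvRank (PySem.Set.update seen t) n = pvRank seen n :=
        pvRank_update_of_mem seen t n hmem
      simp [List.map_cons, this, List.append_assoc]
    · have hc : (pvMapOf seen).contains n = false := by
        rw [pvMapOf_contains seen hnd]; simpa using hmem
      have hadd : PySem.Set.add seen n = seen ++ [n] := PySem.Set.add_of_not_mem hmem
      simp only [hc, Bool.false_eq_true, if_neg, not_false_iff]
      rw [hadd] at *
      have hins : (pvMapOf seen).insert n ((seen.length : Int) + 1) = pvMapOf (seen ++ [n]) :=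
        (pvMapOf_append seen n).symm
      have hnd' : (seen ++ [n]).Nodup := by
        rw [List.nodup_append]
        exact ⟨hnd, List.nodup_singleton n, by intro a ha b hb; rw [List.mem_singleton] at hb; subst hb; exact fun he => hmem (he ▸ ha)⟩
      have hmem' : n ∈ seen ++ [n] := by simp
      have hlen : ((seen.length : Int) + 1) + 1 = ((seen ++ [n]).length : Int) + 1 := by
        simp [List.length_append]
      rw [hins, hlen, ih (seen ++ [n]) hnd' _]
      rw [pvMapOf_getD (seen ++ [n]) hnd' n hmem']
      have : pvRank (PySem.Set.update (seen ++ [n]) t) n = pvRank (seen ++ [n]) n :=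
        pvRank_update_of_mem (seen ++ [n]) t n hmem'
      simp [List.map_cons, this, List.append_assoc]

-- A computes the first-occurrence ranks
lemma pvA_eq_rank (l : List String) :
    convert_names_to_orderedint l = l.map (fun n => pvRank (PySem.List.dedup l) n) := by
  unfold convert_names_to_orderedint
  have h0 : (pvMapOf [] : PySem.Dict String Int) = PySem.Dict.empty := rfl
  have := pvLoopA l [] List.nodup_nil []
  rw [h0] at this
  rw [show ((([] : List String).length : Int) + 1) = 1 by simp] at this
  rw [this]
  rw [PySem.Set.update_nil_left]
  simp

lemma pvOfList_append (a b : List String) :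
    PySem.Set.ofList (a ++ b) = PySem.Set.update (PySem.Set.ofList a) b := by
  simp [PySem.Set.ofList_eq_foldl, PySem.Set.update, List.foldl_append]

-- B computes the first-occurrence ranks too
lemma pvB_eq_rank (l : List String) :
    convert_names_to_orderedint_alt l = l.map (fun n => pvRank (PySem.List.dedup l) n) := by
  unfold convert_names_to_orderedint_alt
  apply List.map_congr_left
  intro n hn
  obtain ⟨j, hj⟩ : ∃ j, PySem.List.index? l n = some j :=
    Option.isSome_iff_exists.1 ((PySem.List.index?_isSome_iff l n).2 hn)
  obtain ⟨hlt, hget, hfirst⟩ := PySem.List.getElem_of_index?_eq_some hj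
  rw [hj]
  simp only [Option.getD_some]
  -- the slice is the prefix of length j+1
  have hslice : PySem.List.slice l none (some (((j : Nat) : Int) + 1)) = l.take (j + 1) := by
    rw [show (((j : Nat) : Int) + 1) = (((j + 1 : Nat) : Int)) by push_cast; ring,
        PySem.List.slice_to_natCast]
  have hnotmem : n ∉ l.take j := by
    intro hmem
    obtain ⟨i, hi, hgi⟩ := List.getElem_of_mem hmem
    have hij : i < j := lt_of_lt_of_le hi (by simp)
    exact hfirst i hij (by rw [← hgi]; exact (List.getElem_take).symm)
  have hnS : n ∉ PySem.Set.ofList (l.take j) := by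
    rw [PySem.Set.mem_ofList]; exact hnotmem
  have htake : l.take (j + 1) = l.take j ++ [n] := by
    rw [List.take_add_one]
    congr 1
    simp [List.getElem?_eq_getElem hlt, hget]
  have hS : PySem.Set.ofList (l.take (j + 1)) = PySem.Set.ofList (l.take j) ++ [n] := by
    rw [htake, pvOfList_append,
        show PySem.Set.update (PySem.Set.ofList (l.take j)) [n]
           = PySem.Set.add (PySem.Set.ofList (l.take j)) n from rfl,
        PySem.Set.add_of_not_mem hnS]
  have hS' : PySem.Set.ofList (l.take j ++ [n]) = PySem.Set.ofList (l.take j) ++ [n] :=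
    htake ▸ hS
  -- decompose l around the first occurrence of n
  have hdecomp : l = (l.take j ++ [n]) ++ l.drop (j + 1) := by
    conv_lhs => rw [← List.take_append_drop j l]
    rw [List.append_assoc]
    congr 1
    rw [List.drop_eq_getElem_cons hlt, hget]
    rfl
  have hdedup : PySem.List.dedup l
      = (PySem.Set.ofList (l.take j) ++ [n])
        ++ ((PySem.Set.ofList (l.drop (j + 1))).filter
              (fun y => !(PySem.Set.ofList (l.take j) ++ [n]).contains y)) := by
    rw [PySem.List.dedup_eq_ofList]
    conv_lhs => rw [hdecomp]
    rw [pvOfList_append, hS', PySem.Set.update_eq_append_filter]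
  have hrank : pvRank (PySem.List.dedup l) n = ((PySem.Set.ofList (l.take j)).length : Int) + 1 := by
    unfold pvRank
    rw [hdedup]
    have hmemS : n ∈ PySem.Set.ofList (l.take j) ++ [n] := by simp
    rw [PySem.List.index?_append_of_mem _ hmemS]
    rw [PySem.List.index?_append_singleton_self _ n hnS]
    simp
  rw [hslice, hrank, hS]
  simp [PySem.Set.len]

-- ===== VERDICT (by name: the statement is the Claim_ definition above) =====
theorem convert_names_to_orderedint_spec : Claim_equal_convert_names_to_orderedint := by
  intro name_list _
  show convert_names_to_orderedint name_list = convert_names_to_orderedint_alt name_list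
  rw [pvA_eq_rank, pvB_eq_rank]
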